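-- pv_equiv track=rewrite | github.com/chumingi/Baekjoon | LECTURE/joonlab/sec02_구현/sec02_01_주어진_시나리오를_배열로_구현하기/j_02_01_01_1095_배열_전체_탐색하기.py | solution
-- ===== SOURCE A (Python) =====
-- def solution(n, m, A, B):
--     # m개의 질의를 순서대로 처리한다. 현재 질의 정보는 k에 저장된다.
--     # answer: m개의 질의 결과를 순서대로 저장하는 배열
--     answer = []
--     for k in B:
--         # 배열 A의 첫번째 원소부터 마지막 원소까지 순서대로 탐색하면서,
--         # 배열 A에서 k보다 크거나 같은 원소의 개수를 변수 cnt에 저장한다.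
--         cnt = 0
--         for a in A:
--             if a >= k:
--                 cnt += 1
--
--         # cnt에 저장된 값을 answer의 끝에 추가한다.
--         answer.append(cnt)
--
--     return answer
-- ===== SOURCE B (Python) =====
-- def solution(n, m, A, B):
--     # Sort A once, then answer each query with a binary search (bisect_left,
--     # written out since this module imports nothing): elements >= k are exactly
--     # the suffix starting at the insertion point of k.
--     s = sorted(A)
--     total = len(s)
--     answer = []
--     for k in B:
--         lo, hi = 0, total
--         while lo < hi:
--             mid = (lo + hi) // 2
--             if s[mid] < k:
--                 lo = mid + 1
--             else:
--                 hi = mid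
--         answer.append(total - lo)
--     return answer
-- ===== Notes on version B (the rewrite author's own statement) =====
-- stated objective: faster
-- what changed: Replaces the per-query linear scan of A by sorting A once and answering each query with a binary search (bisect_left written out), returning len(A) minus the insertion point.
import Mathlib
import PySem

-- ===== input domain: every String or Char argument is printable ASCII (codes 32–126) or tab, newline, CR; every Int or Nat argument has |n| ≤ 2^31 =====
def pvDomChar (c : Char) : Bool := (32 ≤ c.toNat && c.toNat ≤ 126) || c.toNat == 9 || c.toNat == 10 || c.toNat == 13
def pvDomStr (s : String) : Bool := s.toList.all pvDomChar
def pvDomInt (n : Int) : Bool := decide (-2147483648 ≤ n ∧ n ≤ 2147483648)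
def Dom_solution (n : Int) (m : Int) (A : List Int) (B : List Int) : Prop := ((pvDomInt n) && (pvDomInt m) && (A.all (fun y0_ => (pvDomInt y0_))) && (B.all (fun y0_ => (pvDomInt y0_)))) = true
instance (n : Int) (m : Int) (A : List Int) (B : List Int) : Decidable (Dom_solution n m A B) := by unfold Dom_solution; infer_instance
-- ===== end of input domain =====

-- B sorts A once and answers each query with a binary search (bisect_left) instead of A's per-query linear scan.


-- ===== PORT A =====
-- for k in B: cnt = 0; for a in A: if a >= k: cnt += 1; answer.append(cnt)
def solution (n : Int) (m : Int) (A : List Int) (B : List Int) : List Int :=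
  B.foldl (fun answer k =>
    answer ++ [A.foldl (fun cnt a => if a ≥ k then cnt + 1 else cnt) (0 : Int)]) []

-- ===== PORT B =====
-- s = sorted(A); per query the hand-written lo/hi halving loop is exactly
-- bisect_left, which PySem owns as PySem.List.bisectLeft.
def solution_alt (n : Int) (m : Int) (A : List Int) (B : List Int) : List Int :=
  let s := PySem.List.sorted A (fun x => x) false
  let total : Int := s.length
  B.foldl (fun answer k => answer ++ [total - (PySem.List.bisectLeft s k : Int)]) []

-- ===== PRECONDITION & SPEC =====
def Spec_solution (n : Int) (m : Int) (A : List Int) (B : List Int) (out : List Int) : Prop := out = solution_alt n m A B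
instance (n : Int) (m : Int) (A : List Int) (B : List Int) (out : List Int) : Decidable (Spec_solution n m A B out) := by unfold Spec_solution; infer_instance

-- ===== CLAIM (what is proved, stated in full; the proofs are below) =====
def Claim_equal_solution : Prop := ∀ (n : Int) (m : Int) (A : List Int) (B : List Int), Dom_solution n m A B → Spec_solution n m A B (solution n m A B)

-- ===== LEMMAS AND PROOFS =====

-- a list whose first r elements are < k and the rest are ≥ k has exactly r elements < k
lemma countP_lt_of_prefix (k : Int) (s : List Int) (r : ℕ) (hr : r ≤ s.length)
    (h1 : ∀ j (hj : j < s.length), j < r → s[j] < k)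
    (h2 : ∀ j (hj : j < s.length), r ≤ j → k ≤ s[j]) :
    s.countP (fun a => a < k) = r := by
  have hsplit := List.take_append_drop r s
  have ht : (s.take r).countP (fun a => a < k) = (s.take r).length := by
    rw [List.countP_eq_length]
    intro a ha
    obtain ⟨j, hj, rfl⟩ := List.getElem_of_mem ha
    have hjr : j < r := lt_of_lt_of_le hj (by simp)
    have hjs : j < s.length := lt_of_lt_of_le hj (by simp)
    simp only [List.getElem_take]
    simpa using h1 j hjs hjr
  have hd : (s.drop r).countP (fun a => a < k) = 0 := by
    rw [List.countP_eq_zero]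
    intro a ha
    obtain ⟨j, hj, rfl⟩ := List.getElem_of_mem ha
    have hjs : r + j < s.length := by simpa [List.length_drop] using Nat.add_lt_of_lt_sub' (by simpa [List.length_drop] using hj)
    simp only [List.getElem_drop]
    simpa using not_lt.mpr (h2 (r + j) hjs (Nat.le_add_right _ _))
  calc s.countP (fun a => a < k)
      = ((s.take r) ++ (s.drop r)).countP (fun a => a < k) := by rw [hsplit]
    _ = (s.take r).countP (fun a => a < k) + (s.drop r).countP (fun a => a < k) := List.countP_append ..
    _ = (s.take r).length + 0 := by rw [ht, hd]
    _ = r := by simp [List.length_take, Nat.min_eq_left hr]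

-- bisect_left on sorted(A) counts the elements of A below k
lemma bisectLeft_sorted_eq_countP (A : List Int) (k : Int) :
    PySem.List.bisectLeft (PySem.List.sorted A (fun x => x) false) k
      = (PySem.List.sorted A (fun x => x) false).countP (fun a => a < k) := by
  set s := PySem.List.sorted A (fun x => x) false with hs
  have hpw : s.Pairwise (fun a b => a ≤ b) := by
    simpa using PySem.List.sorted_pairwise A (fun x => x)
  obtain ⟨hle, h1, h2⟩ := PySem.List.bisectLeft_spec s k hpw
  exact (countP_lt_of_prefix k s _ hle h1 h2).symm

-- A's inner counting loop, expressed through the sorted list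
lemma count_loop_eq (A : List Int) (k : Int) :
    A.foldl (fun cnt a => if a ≥ k then cnt + 1 else cnt) (0 : Int)
      = ((PySem.List.sorted A (fun x => x) false).length : Int)
        - (PySem.List.bisectLeft (PySem.List.sorted A (fun x => x) false) k : Int) := by
  have hfold := PySem.List.foldl_count_if (fun a => decide (k ≤ a)) A 0
  simp only [decide_eq_true_eq] at hfold
  have hperm : (PySem.List.sorted A (fun x => x) false).Perm A :=
    PySem.List.sorted_perm A (fun x => x) false
  have hcp := hperm.countP_eq (fun a => decide (k ≤ a))
  have hsum : (PySem.List.sorted A (fun x => x) false).countP (fun a => decide (k ≤ a))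
      + (PySem.List.sorted A (fun x => x) false).countP (fun a => decide (a < k))
      = (PySem.List.sorted A (fun x => x) false).length := by
    have hlen := List.length_eq_countP_add_countP (p := fun a => decide (k ≤ a))
      (l := PySem.List.sorted A (fun x => x) false)
    have hneg : (PySem.List.sorted A (fun x => x) false).countP (fun a => ¬ (decide (k ≤ a)) = true)
        = (PySem.List.sorted A (fun x => x) false).countP (fun a => decide (a < k)) := by
      apply List.countP_congr
      intro a _
      simp [not_le]
    omega
  have hbl := bisectLeft_sorted_eq_countP A k
  show List.foldl (fun cnt a => if k ≤ a then cnt + 1 else cnt) (0 : Int) A = _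
  rw [hfold]
  omega

-- ===== VERDICT (by name: the statement is the Claim_ definition above) =====
theorem solution_spec : Claim_equal_solution := by
  intro n m A B _
  unfold Spec_solution solution solution_alt
  rw [PySem.List.foldl_append_singleton_eq_map, PySem.List.foldl_append_singleton_eq_map]
  simp only [List.nil_append]
  exact List.map_congr_left (fun k _ => count_loop_eq A k)
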